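-- pv_equiv track=rewrite | github.com/F48l4n/Advent_of_Code_Py | 2015/day3/solution.py | get_visited_houses_with_robot
-- ===== SOURCE A (Python) =====
-- def get_visited_houses_with_robot(moves: str) -> int:
--     def get_new_xy(ox: int, oy: int, last_move: chr) -> tuple:
--         if last_move == '^':
--             oy += 1
--         elif last_move == 'v':
--             oy -= 1
--         elif last_move == '>':
--             ox += 1
--         elif last_move == '<':
--             ox -= 1
--         return ox, oy
--
--     visited_houses = [(0, 0),]
--     x, y = 0, 0
--     rx, ry = 0, 0
--     for i, move in enumerate(moves):
--         if i % 2 == 0: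
--             rx, ry = get_new_xy(rx, ry, move)
--             visited_houses.append((rx, ry))
--         else:
--             x, y = get_new_xy(x, y, move)
--             visited_houses.append((x, y))
--     return len(set(visited_houses))
-- ===== SOURCE B (Python) =====
-- def get_visited_houses_with_robot(moves: str) -> int:
--     deltas = {'^': (0, 1), 'v': (0, -1), '>': (1, 0), '<': (-1, 0)}
--
--     def walk(ms):
--         x, y = 0, 0
--         visited = []
--         for m in ms:
--             dx, dy = deltas.get(m, (0, 0))
--             x, y = x + dx, y + dy
--             visited.append((x, y))
--         return visited
--
--     robot = walk(moves[0::2])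
--     santa = walk(moves[1::2])
--     return len({(0, 0)} | set(robot) | set(santa))
-- ===== Notes on version B (the rewrite author's own statement) =====
-- stated objective: alternative
-- what changed: Instead of one interleaved loop over enumerate(moves) tagging steps by index parity and collecting everything into one list, B first splits the moves by parity into the two movers' subsequences with slicing, walks each independently with a delta-dict lookup, and returns the size of the union of the two visit sets with the origin.
import Mathlib
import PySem

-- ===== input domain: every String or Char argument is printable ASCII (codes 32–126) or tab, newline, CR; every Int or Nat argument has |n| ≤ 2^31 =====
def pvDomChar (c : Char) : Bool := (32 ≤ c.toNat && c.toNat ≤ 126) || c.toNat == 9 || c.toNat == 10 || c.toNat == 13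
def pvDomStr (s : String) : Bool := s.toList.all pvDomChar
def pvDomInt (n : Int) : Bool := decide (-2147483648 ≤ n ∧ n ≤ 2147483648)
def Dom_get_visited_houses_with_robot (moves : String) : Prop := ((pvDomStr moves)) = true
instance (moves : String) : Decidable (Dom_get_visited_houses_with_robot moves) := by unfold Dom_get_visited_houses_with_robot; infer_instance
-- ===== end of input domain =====

-- B splits the moves by parity into the two movers' subsequences, walks each independently
-- and counts the union of the visit sets with the origin; A runs one interleaved indexed loop.

-- ===== PORT A =====
def pvGetNewXY (ox oy : Int) (m : Char) : Int × Int :=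
  if m = '^' then (ox, oy + 1)
  else if m = 'v' then (ox, oy - 1)
  else if m = '>' then (ox + 1, oy)
  else if m = '<' then (ox - 1, oy)
  else (ox, oy)

-- the 'for i, move in enumerate(moves)' loop, carrying (x,y), (rx,ry) and visited_houses
def pvALoop : List (Int × Char) → Int × Int → Int × Int → List (Int × Int) → List (Int × Int)
  | [], _, _, vis => vis
  | (i, m) :: rest, (x, y), (rx, ry), vis =>
    if i % 2 = 0 then
      let p := pvGetNewXY rx ry m
      pvALoop rest (x, y) p (vis ++ [p])
    else
      let p := pvGetNewXY x y m
      pvALoop rest p (rx, ry) (vis ++ [p])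

def get_visited_houses_with_robot (moves : String) : Int :=
  ((PySem.Set.ofList
      (pvALoop (PySem.List.enumerate moves.toList) (0, 0) (0, 0) [(0, 0)])).length : Int)

-- ===== PORT B =====
def pvDeltas : PySem.Dict Char (Int × Int) :=
  PySem.Dict.ofList [('^', (0, 1)), ('v', (0, -1)), ('>', (1, 0)), ('<', (-1, 0))]

-- B's walk(ms): positions visited after each move, starting from (0,0)
def pvWalk : Int × Int → List Char → List (Int × Int)
  | _, [] => []
  | (x, y), m :: rest =>
    let d := PySem.Dict.getD pvDeltas m (0, 0)
    let q := (x + d.1, y + d.2)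
    q :: pvWalk q rest

-- hand port of the step-2 slice s[0::2] (PySem.List.slice? returns an Option; this is the
-- exact value of xs[0::2] for every list)
def pvEveryOther {α : Type} : List α → List α
  | [] => []
  | [a] => [a]
  | a :: _ :: rest => a :: pvEveryOther rest

def get_visited_houses_with_robot_alt (moves : String) : Int :=
  let cs := moves.toList
  let robot := pvWalk (0, 0) (pvEveryOther cs)            -- moves[0::2]
  let santa := pvWalk (0, 0) (pvEveryOther (cs.drop 1))   -- moves[1::2]
  ((PySem.Set.union
      (PySem.Set.union (PySem.Set.ofList [((0 : Int), (0 : Int))]) robot) santa).length : Int)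

-- ===== PRECONDITION & SPEC =====
def Spec_get_visited_houses_with_robot (moves : String) (out : Int) : Prop := out = get_visited_houses_with_robot_alt moves
instance (moves : String) (out : Int) : Decidable (Spec_get_visited_houses_with_robot moves out) := by unfold Spec_get_visited_houses_with_robot; infer_instance

-- ===== CLAIM (what is proved, stated in full; the proofs are below) =====
def Claim_equal_get_visited_houses_with_robot : Prop := ∀ (moves : String), Dom_get_visited_houses_with_robot moves → Spec_get_visited_houses_with_robot moves (get_visited_houses_with_robot moves)

-- ===== LEMMAS AND PROOFS =====

-- A's step function and B's delta lookup agree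
theorem pvStep_eq (x y : Int) (m : Char) :
    pvGetNewXY x y m = (x + (PySem.Dict.getD pvDeltas m (0, 0)).1,
                        y + (PySem.Dict.getD pvDeltas m (0, 0)).2) := by
  simp only [pvGetNewXY]
  split_ifs with h1 h2 h3 h4 <;> subst_vars
  · rw [show PySem.Dict.getD pvDeltas '^' (0, 0) = ((0 : Int), (1 : Int)) from by decide]
    simp
  · rw [show PySem.Dict.getD pvDeltas 'v' (0, 0) = ((0 : Int), (-1 : Int)) from by decide]
    simp; ring
  · rw [show PySem.Dict.getD pvDeltas '>' (0, 0) = ((1 : Int), (0 : Int)) from by decide]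
    simp
  · rw [show PySem.Dict.getD pvDeltas '<' (0, 0) = ((-1 : Int), (0 : Int)) from by decide]
    simp; ring
  · have hi : pvDeltas.items =
        [('^', ((0 : Int), (1 : Int))), ('v', (0, -1)), ('>', (1, 0)), ('<', (-1, 0))] := by
      decide
    have e1 : ('^' == m) = false := by simp [Ne.symm h1]
    have e2 : ('v' == m) = false := by simp [Ne.symm h2]
    have e3 : ('>' == m) = false := by simp [Ne.symm h3]
    have e4 : ('<' == m) = false := by simp [Ne.symm h4]
    have hd : PySem.Dict.getD pvDeltas m (0, 0) = ((0 : Int), (0 : Int)) := by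
      simp [PySem.Dict.getD, PySem.Dict.get?, hi, List.find?, e1, e2, e3, e4]
    rw [hd]
    simp

-- the interleaved loop with the enumerate index abstracted away: a moves first, then b
def pvInter : Int × Int → Int × Int → List Char → List (Int × Int)
  | _, _, [] => []
  | a, b, m :: rest =>
    let p := pvGetNewXY a.1 a.2 m
    p :: pvInter b p rest

theorem pvALoop_acc (l : List (Int × Char)) :
    ∀ (s r : Int × Int) (vis : List (Int × Int)),
      pvALoop l s r vis = vis ++ pvALoop l s r [] := by
  induction l with
  | nil => intro s r vis; simp [pvALoop]
  | cons im rest ih =>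
    rintro ⟨x, y⟩ ⟨rx, ry⟩ vis
    obtain ⟨i, m⟩ := im
    by_cases h : i % 2 = 0
    · simp only [pvALoop, h, if_pos, List.nil_append]
      rw [ih (x, y) (pvGetNewXY rx ry m) (vis ++ [pvGetNewXY rx ry m]),
        ih (x, y) (pvGetNewXY rx ry m) [pvGetNewXY rx ry m]]
      simp
    · simp only [pvALoop, h, List.nil_append, ite_false]
      rw [ih (pvGetNewXY x y m) (rx, ry) (vis ++ [pvGetNewXY x y m]),
        ih (pvGetNewXY x y m) (rx, ry) [pvGetNewXY x y m]]
      simp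

theorem pvALoop_inter (l : List Char) :
    ∀ (i : Int) (s r : Int × Int),
      (i % 2 = 0 → pvALoop (PySem.List.enumerate l i) s r [] = pvInter r s l) ∧
      (i % 2 = 1 → pvALoop (PySem.List.enumerate l i) s r [] = pvInter s r l) := by
  induction l with
  | nil => intro i s r; simp [PySem.List.enumerate_nil, pvALoop, pvInter]
  | cons m rest ih =>
    rintro i ⟨x, y⟩ ⟨rx, ry⟩
    constructor <;> intro hpar <;>
      rw [PySem.List.enumerate_cons] <;>
      simp only [pvALoop, hpar] <;> norm_num
    · rw [pvALoop_acc, (ih (i + 1) _ _).2 (by omega)]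
      simp [pvInter]
    · rw [pvALoop_acc, (ih (i + 1) _ _).1 (by omega)]
      simp [pvInter]

-- the interleaved visit list is a permutation of the two independent walks
theorem pvInter_perm (l : List Char) :
    ∀ (a b : Int × Int),
      (pvInter a b l).Perm
        (pvWalk a (pvEveryOther l) ++ pvWalk b (pvEveryOther (l.drop 1))) := by
  induction l with
  | nil => intro a b; simp [pvInter, pvEveryOther, pvWalk]
  | cons m rest ih =>
    rintro ⟨ax, ay⟩ b
    have he : pvEveryOther (m :: rest) = m :: pvEveryOther (rest.drop 1) := by
      cases rest <;> rfl
    have hstep := pvStep_eq ax ay m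
    simp only [pvInter, he, List.drop_succ_cons, List.drop_zero, pvWalk, ← hstep,
      List.cons_append]
    refine List.Perm.cons _ ?_
    exact (ih b _).trans (List.perm_append_comm)

theorem pvWitness_mem (moves : String) (z : Int × Int) :
    z ∈ pvALoop (PySem.List.enumerate moves.toList) (0, 0) (0, 0) [(0, 0)] ↔
      z = ((0 : Int), (0 : Int)) ∨
        z ∈ pvWalk (0, 0) (pvEveryOther moves.toList) ∨
        z ∈ pvWalk (0, 0) (pvEveryOther (moves.toList.drop 1)) := by
  rw [pvALoop_acc, (pvALoop_inter moves.toList 0 (0, 0) (0, 0)).1 (by decide)]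
  simp [List.Perm.mem_iff (pvInter_perm moves.toList (0, 0) (0, 0))]

-- ===== VERDICT (by name: the statement is the Claim_ definition above) =====
theorem get_visited_houses_with_robot_spec : Claim_equal_get_visited_houses_with_robot := by
  intro moves _
  show _ = _
  unfold get_visited_houses_with_robot get_visited_houses_with_robot_alt
  congr 1
  apply List.Perm.length_eq
  rw [List.perm_ext_iff_of_nodup (PySem.Set.nodup_ofList _)
      (PySem.Set.nodup_union _ _ (PySem.Set.nodup_union _ _ (PySem.Set.nodup_ofList _)))]
  intro z
  rw [PySem.Set.mem_ofList, pvWitness_mem, PySem.Set.mem_union, PySem.Set.mem_union,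
    PySem.Set.mem_ofList, List.mem_singleton]
  tauto
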